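-- pv_equiv track=rewrite | github.com/conflictmedia/drugucopia | automation/TSConversionUtil.py | map_psychoactive_classes_to_categories
-- ===== SOURCE A (Python) =====
-- CATEGORY_MAPPING: dict[str, str] = {
--     "psychedelic": "hallucinogens",
--     "stimulants": "stimulants",
--     "stimulant": "stimulants",
--     "depressant": "depressants",
--     "depressants": "depressants",
--     "dissociative": "dissociatives",
--     "dissociatives": "dissociatives",
--     "empathogen": "empathogens",
--     "empathogens": "empathogens",
--     "entactogen": "empathogens",
--     "cannabinoid": "cannabinoids",
--     "cannabinoids": "cannabinoids",
--     "opioid": "opioids",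
--     "opioids": "opioids",
--     "deliriant": "deliriants",
--     "deliriants": "deliriants",
--     "nootropic": "nootropics",
--     "nootropics": "nootropics",
-- }
--
-- FALLBACK_CATEGORY = "other"
--
-- def map_psychoactive_classes_to_categories(psychoactive_classes: list[str]) -> list[str]:
--     if not psychoactive_classes:
--         return [FALLBACK_CATEGORY]
--     seen: set[str] = set()
--     result: list[str] = []
--     for p_class in psychoactive_classes:
--         mapped = CATEGORY_MAPPING.get(p_class.lower())
--         if mapped and mapped not in seen:
--             seen.add(mapped)
--             result.append(mapped)
--     return result if result else [FALLBACK_CATEGORY]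
-- ===== SOURCE B (Python) =====
-- CATEGORY_MAPPING: dict[str, str] = {
--     "psychedelic": "hallucinogens",
--     "stimulants": "stimulants",
--     "stimulant": "stimulants",
--     "depressant": "depressants",
--     "depressants": "depressants",
--     "dissociative": "dissociatives",
--     "dissociatives": "dissociatives",
--     "empathogen": "empathogens",
--     "empathogens": "empathogens",
--     "entactogen": "empathogens",
--     "cannabinoid": "cannabinoids",
--     "cannabinoids": "cannabinoids",
--     "opioid": "opioids",
--     "opioids": "opioids",
--     "deliriant": "deliriants",
--     "deliriants": "deliriants",
--     "nootropic": "nootropics",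
--     "nootropics": "nootropics",
-- }
--
-- FALLBACK_CATEGORY = "other"
--
-- # the distinct category values, fixed in advance
-- CATEGORIES = ["hallucinogens", "stimulants", "depressants", "dissociatives",
--               "empathogens", "cannabinoids", "opioids", "deliriants", "nootropics"]
--
--
-- def map_psychoactive_classes_to_categories(psychoactive_classes: list[str]) -> list[str]:
--     # first-occurrence index of each known category in the mapped stream, then
--     # order the categories by that index: no dedup pass, no seen-set.
--     mapped = [CATEGORY_MAPPING[c.lower()] for c in psychoactive_classes
--               if c.lower() in CATEGORY_MAPPING]
--     firsts = sorted(((mapped.index(cat), cat) for cat in CATEGORIES if cat in mapped),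
--                     key=lambda t: t[0])
--     return [cat for _, cat in firsts] or [FALLBACK_CATEGORY]
-- ===== Notes on version B (the rewrite author's own statement) =====
-- stated objective: alternative
-- what changed: Instead of A's single pass that deduplicates on the fly with a seen-set, B computes for each of the nine fixed category values the index of its first occurrence in the mapped stream and sorts the present categories by that index; no dedup structure is kept at all.
import Mathlib
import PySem

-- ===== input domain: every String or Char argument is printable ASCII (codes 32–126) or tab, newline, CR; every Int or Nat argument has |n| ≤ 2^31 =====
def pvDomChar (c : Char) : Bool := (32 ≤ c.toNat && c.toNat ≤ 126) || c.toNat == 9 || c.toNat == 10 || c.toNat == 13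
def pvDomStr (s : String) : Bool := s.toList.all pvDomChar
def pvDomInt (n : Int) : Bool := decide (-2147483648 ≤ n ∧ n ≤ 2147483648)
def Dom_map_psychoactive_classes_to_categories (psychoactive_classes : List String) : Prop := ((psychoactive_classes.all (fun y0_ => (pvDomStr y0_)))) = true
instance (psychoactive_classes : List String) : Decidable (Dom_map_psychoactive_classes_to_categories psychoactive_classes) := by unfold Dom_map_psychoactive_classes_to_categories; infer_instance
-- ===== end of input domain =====

-- B replaces A's single pass with a seen-set by a different algorithm: for each of the nine
-- fixed category values it takes the index of its first occurrence in the mapped stream and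
-- sorts the present categories by that index (alternative decomposition, same asymptotic cost).

def categoryMapping : PySem.Dict String String :=
  PySem.Dict.ofList
    [("psychedelic", "hallucinogens"), ("stimulants", "stimulants"), ("stimulant", "stimulants"),
     ("depressant", "depressants"), ("depressants", "depressants"),
     ("dissociative", "dissociatives"), ("dissociatives", "dissociatives"),
     ("empathogen", "empathogens"), ("empathogens", "empathogens"), ("entactogen", "empathogens"),
     ("cannabinoid", "cannabinoids"), ("cannabinoids", "cannabinoids"),
     ("opioid", "opioids"), ("opioids", "opioids"),
     ("deliriant", "deliriants"), ("deliriants", "deliriants"),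
     ("nootropic", "nootropics"), ("nootropics", "nootropics")]

def fallbackCategory : String := "other"

-- ===== PORT A =====
def map_psychoactive_classes_to_categories (psychoactive_classes : List String) : List String :=
  if psychoactive_classes = [] then [fallbackCategory]
  else
    let st := psychoactive_classes.foldl
      (fun (st : PySem.Set String × List String) p_class =>
        match categoryMapping.get? (PySem.Str.lower p_class) with
        | none => st
        | some mapped =>
          -- Python truthiness 'if mapped and …': a str is truthy iff nonempty
          if mapped ≠ "" ∧ ¬ (PySem.Set.contains st.1 mapped = true) then
            (PySem.Set.add st.1 mapped, st.2 ++ [mapped])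
          else st)
      (PySem.Set.empty, [])
    if st.2 = [] then [fallbackCategory] else st.2

-- ===== PORT B =====
def categoriesList : List String :=
  ["hallucinogens", "stimulants", "depressants", "dissociatives",
   "empathogens", "cannabinoids", "opioids", "deliriants", "nootropics"]

def map_psychoactive_classes_to_categories_alt (psychoactive_classes : List String) : List String :=
  let mapped := psychoactive_classes.filterMap
    (fun c => categoryMapping.get? (PySem.Str.lower c))
  let firsts := PySem.List.sorted
    (categoriesList.filterMap (fun cat =>
      if cat ∈ mapped then (PySem.List.index? mapped cat).map (fun i => (i, cat)) else none))
    (fun t => t.1) false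
  let result := firsts.map (fun t => t.2)
  if result = [] then [fallbackCategory] else result

-- ===== PRECONDITION & SPEC =====
def Spec_map_psychoactive_classes_to_categories (psychoactive_classes : List String) (out : List String) : Prop := out = map_psychoactive_classes_to_categories_alt psychoactive_classes
instance (psychoactive_classes : List String) (out : List String) : Decidable (Spec_map_psychoactive_classes_to_categories psychoactive_classes out) := by unfold Spec_map_psychoactive_classes_to_categories; infer_instance

-- ===== CLAIM (what is proved, stated in full; the proofs are below) =====
def Claim_equal_map_psychoactive_classes_to_categories : Prop := ∀ (psychoactive_classes : List String), Dom_map_psychoactive_classes_to_categories psychoactive_classes → Spec_map_psychoactive_classes_to_categories psychoactive_classes (map_psychoactive_classes_to_categories psychoactive_classes)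

-- ===== LEMMAS AND PROOFS =====

/-- every value of the literal dict is a nonempty string -/
lemma categoryMapping_value_ne_empty (s m : String)
    (h : categoryMapping.get? s = some m) : m ≠ "" := by
  have hall : ∀ p ∈ categoryMapping.items, p.2 ≠ "" := by decide
  exact hall (s, m) (PySem.Dict.mem_items_of_get?_eq_some categoryMapping h)

/-- every value of the literal dict is listed in categoriesList -/
lemma categoryMapping_value_mem (s m : String)
    (h : categoryMapping.get? s = some m) : m ∈ categoriesList := by
  have hall : ∀ p ∈ categoryMapping.items, p.2 ∈ categoriesList := by decide
  exact hall (s, m) (PySem.Dict.mem_items_of_get?_eq_some categoryMapping h)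

/-- A's loop, started with seen and result holding the same element list, keeps them equal:
    it computes the set-update of the start state by the looked-up values, in both components. -/
lemma loopA_eq (l : List String) (s : PySem.Set String) :
    l.foldl
      (fun (st : PySem.Set String × List String) p_class =>
        match categoryMapping.get? (PySem.Str.lower p_class) with
        | none => st
        | some mapped =>
          if mapped ≠ "" ∧ ¬ (PySem.Set.contains st.1 mapped = true) then
            (PySem.Set.add st.1 mapped, st.2 ++ [mapped])
          else st)
      (s, s)
    = (PySem.Set.update s (l.filterMap (fun c => categoryMapping.get? (PySem.Str.lower c))),
       PySem.Set.update s (l.filterMap (fun c => categoryMapping.get? (PySem.Str.lower c)))) := by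
  induction l generalizing s with
  | nil => rfl
  | cons c l ih =>
    cases hg : categoryMapping.get? (PySem.Str.lower c) with
    | none =>
      simp only [List.foldl_cons, List.filterMap_cons, hg]
      exact ih s
    | some m =>
      by_cases hm : m ∈ s
      · have hc : PySem.Set.contains s m = true := (PySem.Set.contains_iff s m).mpr hm
        simp only [List.foldl_cons, List.filterMap_cons, hg, hc, not_true_eq_false, and_false,
          if_false, PySem.Set.update_cons, PySem.Set.add_of_mem hm]
        exact ih s
      · have hc : PySem.Set.contains s m = false :=
          Bool.eq_false_iff.mpr (fun h => hm ((PySem.Set.contains_iff s m).mp h))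
        simp only [List.foldl_cons, List.filterMap_cons, hg, hc, Bool.false_eq_true,
          not_false_eq_true, and_true, if_pos (categoryMapping_value_ne_empty _ _ hg),
          PySem.Set.update_cons, PySem.Set.add_of_not_mem hm]
        exact ih (s ++ [m])

/-- Updating a set by a stream appends exactly the fresh part of the stream's ordered dedup. -/
lemma update_eq_append_filter (s acc : List String) :
    PySem.Set.update acc s
      = acc ++ (PySem.Set.ofList s).filter (fun y => decide (y ∉ acc)) := by
  induction s generalizing acc with
  | nil => simp [PySem.Set.update, PySem.Set.ofList]
  | cons y s ih =>
    have hof : PySem.Set.ofList (y :: s)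
        = [y] ++ (PySem.Set.ofList s).filter (fun z => decide (z ∉ ([y] : List String))) := by
      have := ih (acc := [y])
      simpa [PySem.Set.update_cons, PySem.Set.add, PySem.Set.ofList, PySem.Set.update,
        PySem.Set.contains] using this
    rw [PySem.Set.update_cons, ih, hof]
    by_cases hy : y ∈ acc
    · rw [PySem.Set.add_of_mem hy]
      simp only [List.filter_append, List.filter_filter]
      congr 1
      have h1 : List.filter (fun y_1 => decide (y_1 ∉ acc)) [y] = [] := by simp [hy]
      rw [h1, List.nil_append]
      apply List.filter_congr
      intro z _
      by_cases hz : z ∈ acc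
      · simp [hz]
      · have : z ≠ y := fun h => hz (h ▸ hy)
        simp [hz, this]
    · rw [PySem.Set.add_of_not_mem hy]
      simp only [List.filter_append, List.filter_filter, List.append_assoc]
      congr 1
      have h1 : List.filter (fun y_1 => decide (y_1 ∉ acc)) [y] = [y] := by simp [hy]
      rw [h1]
      congr 1
      apply List.filter_congr
      intro z _
      by_cases hz : z ∈ acc
      · simp [hz]
      · by_cases hzy : z = y <;> simp [hz, hzy]

/-- first-occurrence dedup of a cons -/
lemma ofList_cons (y : String) (s : List String) :
    PySem.Set.ofList (y :: s)
      = y :: (PySem.Set.ofList s).filter (fun z => decide (z ≠ y)) := by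
  have := update_eq_append_filter s [y]
  have h0 : PySem.Set.ofList (y :: s) = PySem.Set.update [y] s := by
    simp [PySem.Set.ofList, PySem.Set.update, PySem.Set.add, PySem.Set.contains]
  rw [h0, this]
  simp

/-- elements of the ordered dedup are listed in strictly increasing first-occurrence order -/
lemma pairwise_idxOf (s : List String) :
    (PySem.Set.ofList s).Pairwise (fun a b => s.idxOf a < s.idxOf b) := by
  induction s with
  | nil => simp [PySem.Set.ofList]
  | cons y s ih =>
    rw [ofList_cons]
    constructor
    · intro b hb
      have hby : b ≠ y := by simpa using (List.mem_filter.mp hb).2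
      rw [List.idxOf_cons_self, List.idxOf_cons_ne _ (fun h => hby h.symm)]
      omega
    · refine (List.Pairwise.sublist
        (List.filter_sublist (l := PySem.Set.ofList s) (p := fun z => decide (z ≠ y))) ih).imp_of_mem ?_
      intro a b ha hb hab
      have hay : a ≠ y := by simpa using (List.mem_filter.mp ha).2
      have hby : b ≠ y := by simpa using (List.mem_filter.mp hb).2
      rw [List.idxOf_cons_ne _ (fun h => hay h.symm), List.idxOf_cons_ne _ (fun h => hby h.symm)]
      omega

/-- .index on a member returns the first-occurrence index -/
lemma index?_of_mem (l : List String) (a : String) (h : a ∈ l) :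
    PySem.List.index? l a = some (l.idxOf a) := by
  induction l with
  | nil => cases h
  | cons b l ih =>
    by_cases hb : b = a
    · subst hb
      rw [PySem.List.index?_cons_self, List.idxOf_cons_self]
    · have ha : a ∈ l := by
        rcases List.mem_cons.mp h with h' | h'
        · exact absurd h'.symm hb
        · exact h'
      rw [PySem.List.index?_cons_of_ne _ hb, ih ha, List.idxOf_cons_ne _ hb]
      rfl

/-- the generator over the fixed category list, written as filter-then-map -/
lemma filterMap_if_eq (L mapped : List String) :
    L.filterMap (fun cat =>
        if cat ∈ mapped then (PySem.List.index? mapped cat).map (fun i => (i, cat)) else none)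
      = (L.filter (fun cat => decide (cat ∈ mapped))).map (fun c => (mapped.idxOf c, c)) := by
  induction L with
  | nil => rfl
  | cons cat L ih =>
    rw [List.filterMap_cons]
    by_cases h : cat ∈ mapped
    · simp only [if_pos h, index?_of_mem mapped cat h, Option.map_some]
      rw [ih]
      simp [h]
    · simp only [if_neg h]
      rw [ih]
      simp [h]

/-- core: sorting the per-category first indices reproduces the ordered dedup of the stream -/
lemma sorted_firsts_eq (s : List String) (hsub : ∀ x ∈ s, x ∈ categoriesList) :
    (PySem.List.sorted
      (categoriesList.filterMap (fun cat =>
        if cat ∈ s then (PySem.List.index? s cat).map (fun i => (i, cat)) else none))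
      (fun t => t.1) false).map (fun t => t.2)
    = PySem.Set.ofList s := by
  rw [filterMap_if_eq]
  have hperm0 : (PySem.Set.ofList s).Perm
      (categoriesList.filter (fun c => decide (c ∈ s))) := by
    refine (List.perm_ext_iff_of_nodup (PySem.Set.nodup_ofList s) ?_).mpr ?_
    · exact List.Nodup.filter _ (by decide)
    · intro a
      simp only [PySem.Set.mem_ofList, List.mem_filter, decide_eq_true_eq]
      exact ⟨fun h => ⟨hsub a h, h⟩, fun h => h.2⟩
  have hperm : ((PySem.Set.ofList s).map (fun c => (s.idxOf c, c))).Perm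
      ((categoriesList.filter (fun c => decide (c ∈ s))).map (fun c => (s.idxOf c, c))) :=
    hperm0.map _
  have hpair : ((PySem.Set.ofList s).map (fun c => (s.idxOf c, c))).Pairwise
      (fun a b => (fun t : Nat × String => t.1) a < (fun t : Nat × String => t.1) b) := by
    rw [List.pairwise_map]
    exact pairwise_idxOf s
  have hs : PySem.List.sorted
      ((categoriesList.filter (fun cat => decide (cat ∈ s))).map (fun c => (s.idxOf c, c)))
      (fun t => t.1) false
      = (PySem.Set.ofList s).map (fun c => (s.idxOf c, c)) :=
    PySem.List.sorted_eq_of_perm_of_pairwise_lt _ _ _ hperm hpair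
  have hcomp : ((fun t : Nat × String => t.2) ∘ fun c => (s.idxOf c, c)) = fun c => c := rfl
  rw [hs, List.map_map, hcomp]
  simp

-- ===== VERDICT (by name: the statement is the Claim_ definition above) =====
theorem map_psychoactive_classes_to_categories_spec : Claim_equal_map_psychoactive_classes_to_categories := by
  intro pcs _
  show _ = _
  by_cases hnil : pcs = []
  · subst hnil; decide
  · rw [map_psychoactive_classes_to_categories, if_neg hnil,
        map_psychoactive_classes_to_categories_alt,
        show ((PySem.Set.empty : PySem.Set String), ([] : List String))
          = (([] : PySem.Set String), ([] : List String)) from rfl,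
        loopA_eq pcs []]
    have hsub : ∀ x ∈ pcs.filterMap (fun c => categoryMapping.get? (PySem.Str.lower c)),
        x ∈ categoriesList := by
      intro x hx
      obtain ⟨c, _, hc⟩ := List.mem_filterMap.mp hx
      exact categoryMapping_value_mem _ _ hc
    simp only [sorted_firsts_eq _ hsub, ← PySem.Set.update_nil_left]
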